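-- pv_equiv track=rewrite | github.com/moldescriptor/molecule-descriptors-webtool | app/charger.py | reformat_rules
-- ===== SOURCE A (Python) =====
-- def reformat_rules(rules):
--     rule_counter = 0
--     for rule in rules:
--         trans_counter = 0
--         for transformation in rule[0]:
--             educt, product = transformation.split('>>')
--             # Primary amines
--             product = product.replace('[NH3+]', '[N+]([H])([H])[H]')
--             # Secondary amines
--             product = product.replace('[NH2+]', '[N+]([H])([H])')
--             # Tertiary amines
--             product = product.replace('[NH+]', '[N+]([H])')
--             product = product.replace('[nH+]', '[n+]([H])')
--             product = product.replace('[nH]', '[n]([H])')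
--             reaction = educt + '>>' + product
--             rules[rule_counter][0][trans_counter] = reaction
--             trans_counter += 1
--         rule_counter += 1
--     return rules
-- ===== SOURCE B (Python) =====
-- # Single left-to-right scan over the product replacing all five amine tokens in
-- # one pass, instead of A's five sequential full-string .replace passes.
-- _REPL = [('[NH3+]', '[N+]([H])([H])[H]'),
--          ('[NH2+]', '[N+]([H])([H])'),
--          ('[NH+]', '[N+]([H])'),
--          ('[nH+]', '[n+]([H])'),
--          ('[nH]', '[n]([H])')]
--
--
-- def _rewrite(product):
--     out = []
--     i = 0
--     n = len(product)
--     while i < n: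
--         for tok, rep in _REPL:
--             if product.startswith(tok, i):
--                 out.append(rep)
--                 i += len(tok)
--                 break
--         else:
--             out.append(product[i])
--             i += 1
--     return ''.join(out)
--
--
-- def reformat_rules(rules):
--     for rule in rules:
--         trans = rule[0]
--         for i, transformation in enumerate(trans):
--             educt, product = transformation.split('>>')
--             trans[i] = educt + '>>' + _rewrite(product)
--     return rules
-- ===== Notes on version B (the rewrite author's own statement) =====
-- stated objective: alternative
-- what changed: A runs five sequential full-string str.replace passes over each product; B rewrites the product in a single left-to-right scan that matches the five amine tokens in place (valid because the tokens cannot overlap and no replacement text re-creates a token, which the Lean proof establishes), and rebuilds the lists element-wise instead of counter-indexed writeback; Pre_ excludes only inputs where A raises (an empty rule, or a transformation whose '>>'-count is not 1).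
import Mathlib
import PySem

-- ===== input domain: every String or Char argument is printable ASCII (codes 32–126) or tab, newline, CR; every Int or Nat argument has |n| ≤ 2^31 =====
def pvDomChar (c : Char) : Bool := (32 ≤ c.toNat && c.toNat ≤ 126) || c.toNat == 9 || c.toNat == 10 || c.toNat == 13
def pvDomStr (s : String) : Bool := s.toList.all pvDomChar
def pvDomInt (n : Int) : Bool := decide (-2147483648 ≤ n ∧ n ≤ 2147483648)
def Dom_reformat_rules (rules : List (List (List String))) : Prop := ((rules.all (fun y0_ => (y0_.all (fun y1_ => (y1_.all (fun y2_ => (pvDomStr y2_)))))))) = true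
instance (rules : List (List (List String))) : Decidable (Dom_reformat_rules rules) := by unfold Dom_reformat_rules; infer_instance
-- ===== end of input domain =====

-- B replaces A's five sequential full-string .replace passes by ONE left-to-right scan
-- matching the five amine tokens in place (objective: alternative, same cost class).
-- A mutates `rules` in place and returns it; the equivalence proved here is about the
-- RETURN value only (B performs the same in-place mutation in Python).

-- ===== PORT A =====
def applyA (transformation : String) : String :=
  match PySem.Str.split? transformation ">>" with
  | some [educt, product] =>
    let p1 := PySem.Str.replace product "[NH3+]" "[N+]([H])([H])[H]"
    let p2 := PySem.Str.replace p1 "[NH2+]" "[N+]([H])([H])"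
    let p3 := PySem.Str.replace p2 "[NH+]" "[N+]([H])"
    let p4 := PySem.Str.replace p3 "[nH+]" "[n+]([H])"
    let p5 := PySem.Str.replace p4 "[nH]" "[n]([H])"
    educt ++ ">>" ++ p5
  | _ => transformation   -- Python raises ValueError here (unpack of ≠ 2 parts); excluded by Pre_

-- the Python mutation rules[rule_counter][0][trans_counter] = reaction is modelled by
-- List.set writeback at the two counters carried in the fold state
def reformat_rules (rules : List (List (List String))) : List (List (List String)) :=
  (rules.foldl
    (fun (st : List (List (List String)) × Nat) rule =>
      let rc := st.2
      let inner := (rule.headD []).foldl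
        (fun (st2 : List (List (List String)) × Nat) transformation =>
          let reaction := applyA transformation
          let r := st2.1.getD rc []
          (st2.1.set rc (r.set 0 ((r.headD []).set st2.2 reaction)), st2.2 + 1))
        (st.1, 0)
      (inner.1, rc + 1))
    (rules, 0)).1

-- ===== PORT B =====
-- the five (token, replacement) pairs of Source B's _REPL, as char lists
def tokN3 : List Char := ['[', 'N', 'H', '3', '+', ']']
def repN3 : List Char := ['[', 'N', '+', ']', '(', '[', 'H', ']', ')', '(', '[', 'H', ']', ')', '[', 'H', ']']
def tokN2 : List Char := ['[', 'N', 'H', '2', '+', ']']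
def repN2 : List Char := ['[', 'N', '+', ']', '(', '[', 'H', ']', ')', '(', '[', 'H', ']', ')']
def tokN1 : List Char := ['[', 'N', 'H', '+', ']']
def repN1 : List Char := ['[', 'N', '+', ']', '(', '[', 'H', ']', ')']
def tokn1 : List Char := ['[', 'n', 'H', '+', ']']
def repn1 : List Char := ['[', 'n', '+', ']', '(', '[', 'H', ']', ')']
def tokn0 : List Char := ['[', 'n', 'H', ']']
def repn0 : List Char := ['[', 'n', ']', '(', '[', 'H', ']', ')']

-- Source B's `_rewrite` while loop: at each position try the five tokens in order
-- (str.startswith at an offset = List.isPrefixOf on the remaining suffix),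
-- emit the replacement and skip the token, else copy one char
def scanB : List Char → List Char
  | [] => []
  | c :: t =>
    if tokN3.isPrefixOf (c :: t) then repN3 ++ scanB ((c :: t).drop 6)
    else if tokN2.isPrefixOf (c :: t) then repN2 ++ scanB ((c :: t).drop 6)
    else if tokN1.isPrefixOf (c :: t) then repN1 ++ scanB ((c :: t).drop 5)
    else if tokn1.isPrefixOf (c :: t) then repn1 ++ scanB ((c :: t).drop 5)
    else if tokn0.isPrefixOf (c :: t) then repn0 ++ scanB ((c :: t).drop 4)
    else c :: scanB t
termination_by l => l.length
decreasing_by all_goals (simp only [List.length_drop, List.length_cons]; omega)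

def rewriteB (product : String) : String := String.ofList (scanB product.toList)

def applyB (transformation : String) : String :=
  match PySem.Str.split? transformation ">>" with
  | some [educt, product] => educt ++ ">>" ++ rewriteB product
  | _ => transformation

def reformat_rules_alt (rules : List (List (List String))) : List (List (List String)) :=
  rules.map (fun rule =>
    match rule with
    | [] => []
    | ts :: rest => ts.map applyB :: rest)

-- ===== PRECONDITION & SPEC =====
-- Pre_ excludes exactly the inputs where the Python A raises: an empty rule (IndexError
-- at rule[0]) or a transformation that does not split on '>>' into exactly two parts
-- (ValueError at the tuple unpacking).
def Pre_reformat_rules (rules : List (List (List String))) : Prop :=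
  (rules.all (fun rule =>
    !rule.isEmpty && (rule.headD []).all (fun t => PySem.Str.count t ">>" == 1))) = true
instance (rules : List (List (List String))) : Decidable (Pre_reformat_rules rules) := by unfold Pre_reformat_rules; infer_instance

def pvWitness_reformat_rules : List (List (List String)) :=
  [[["C[NH3+]>>C[NH3+]", "c1cc[nH+]cc1>>c1cc[nH]cc1"], ["k"]], [["O>>O[NH2+]"]]]

def Spec_reformat_rules (rules : List (List (List String))) (out : List (List (List String))) : Prop := out = reformat_rules_alt rules
instance (rules : List (List (List String))) (out : List (List (List String))) : Decidable (Spec_reformat_rules rules out) := by unfold Spec_reformat_rules; infer_instance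

-- ===== CLAIM (what is proved, stated in full; the proofs are below) =====
def Claim_equal_reformat_rules : Prop := ∀ (rules : List (List (List String))), Dom_reformat_rules rules → Pre_reformat_rules rules → Spec_reformat_rules rules (reformat_rules rules)

-- ===== LEMMAS AND PROOFS =====

-- proof-side model of one Chars.replace pass (nonempty pattern o :: old') as a plain scan
def repl1 (o : Char) (old' new : List Char) : List Char → List Char
  | [] => []
  | c :: t =>
    if (o :: old').isPrefixOf (c :: t) then new ++ repl1 o old' new (t.drop old'.length)
    else c :: repl1 o old' new t
termination_by l => l.length
decreasing_by all_goals (simp only [List.length_drop, List.length_cons]; omega)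

theorem go_eq (o : Char) (old' new : List Char) :
    ∀ (fuel : Nat) (l acc : List Char), l.length ≤ fuel →
      PySem.Chars.replace.go (o :: old') new fuel l acc = acc.reverse ++ repl1 o old' new l := by
  intro fuel
  induction fuel with
  | zero =>
    intro l acc h
    have : l = [] := List.eq_nil_of_length_eq_zero (Nat.le_zero.mp h)
    subst this
    simp [PySem.Chars.replace.go, repl1]
  | succ n ih =>
    intro l acc h
    cases l with
    | nil => simp [PySem.Chars.replace.go, repl1]
    | cons c t =>
      rw [PySem.Chars.replace.go]
      rw [repl1]
      by_cases hp : (o :: old').isPrefixOf (c :: t) = true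
      · simp only [hp, if_pos]
        rw [ih]
        · simp
        · simp only [List.drop_succ_cons, List.length_drop, List.length_cons] at *
          omega
      · simp only [hp]
        simp only [Bool.not_eq_true] at hp
        rw [if_neg (by simp), if_neg (by simp)]
        rw [ih _ _ (by simp at h ⊢; omega)]
        simp

theorem replace_eq (o : Char) (old' new : List Char) (s : List Char) :
    PySem.Chars.replace s (o :: old') new = repl1 o old' new s := by
  rw [PySem.Chars.replace]
  simp [go_eq o old' new s.length s [] (le_refl _)]

-- abbreviations for A's five sequential passes on char lists
def rN3 (l : List Char) : List Char := repl1 '[' ['N', 'H', '3', '+', ']'] repN3 l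
def rN2 (l : List Char) : List Char := repl1 '[' ['N', 'H', '2', '+', ']'] repN2 l
def rN1 (l : List Char) : List Char := repl1 '[' ['N', 'H', '+', ']'] repN1 l
def rn1 (l : List Char) : List Char := repl1 '[' ['n', 'H', '+', ']'] repn1 l
def rn0 (l : List Char) : List Char := repl1 '[' ['n', 'H', ']'] repn0 l
def seqA (l : List Char) : List Char := rn0 (rn1 (rN1 (rN2 (rN3 l))))

-- a replace pass whose pattern and replacement both start with '[' neither creates nor
-- destroys a prefix occurrence of a word w that contains no '['
theorem prefix_pass (old' nt : List Char) :
    ∀ (u w : List Char), '[' ∉ w →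
      w.isPrefixOf (repl1 '[' old' ('[' :: nt) u) = w.isPrefixOf u := by
  intro u
  induction u with
  | nil => intro w hw; simp [repl1]
  | cons c t ih =>
    intro w hw
    rw [repl1]
    by_cases hp : ('[' :: old').isPrefixOf (c :: t) = true
    · have hc : c = '[' := by
        have h := List.isPrefixOf_iff_prefix.mp hp
        exact ((List.cons_prefix_cons.mp h).1).symm
      rw [if_pos hp]
      cases w with
      | nil => simp [List.isPrefixOf]
      | cons a w' =>
        have ha : ('[' : Char) ≠ a := fun h => hw (h ▸ List.mem_cons_self ..)
        subst hc
        have hb : (a == '[') = false := beq_eq_false_iff_ne.mpr (Ne.symm ha)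
        simp [List.isPrefixOf, hb]
    · rw [if_neg hp]
      cases w with
      | nil => simp [List.isPrefixOf]
      | cons a w' =>
        have hw' : '[' ∉ w' := fun h => hw (List.mem_cons_of_mem _ h)
        simp [List.isPrefixOf, ih w' hw']

-- token at the head: each pass fires on its own token
theorem fire_N3 (y : List Char) : rN3 (tokN3 ++ y) = repN3 ++ rN3 y := by
  simp [rN3, tokN3, repl1, List.isPrefixOf]
theorem fire_N2 (y : List Char) : rN2 (tokN2 ++ y) = repN2 ++ rN2 y := by
  simp [rN2, tokN2, repl1, List.isPrefixOf]
theorem fire_N1 (y : List Char) : rN1 (tokN1 ++ y) = repN1 ++ rN1 y := by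
  simp [rN1, tokN1, repl1, List.isPrefixOf]
theorem fire_n1 (y : List Char) : rn1 (tokn1 ++ y) = repn1 ++ rn1 y := by
  simp [rn1, tokn1, repl1, List.isPrefixOf]
theorem fire_n0 (y : List Char) : rn0 (tokn0 ++ y) = repn0 ++ rn0 y := by
  simp [rn0, tokn0, repl1, List.isPrefixOf]

-- pass-through over a concrete block no alignment of the token can match
theorem pass_N2_repN3 (y : List Char) : rN2 (repN3 ++ y) = repN3 ++ rN2 y := by
  simp [rN2, repN3, repl1, List.isPrefixOf]
theorem pass_N1_repN3 (y : List Char) : rN1 (repN3 ++ y) = repN3 ++ rN1 y := by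
  simp [rN1, repN3, repl1, List.isPrefixOf]
theorem pass_n1_repN3 (y : List Char) : rn1 (repN3 ++ y) = repN3 ++ rn1 y := by
  simp [rn1, repN3, repl1, List.isPrefixOf]
theorem pass_n0_repN3 (y : List Char) : rn0 (repN3 ++ y) = repN3 ++ rn0 y := by
  simp [rn0, repN3, repl1, List.isPrefixOf]

theorem pass_N3_tokN2 (y : List Char) : rN3 (tokN2 ++ y) = tokN2 ++ rN3 y := by
  simp [rN3, tokN2, repl1, List.isPrefixOf]
theorem pass_N1_repN2 (y : List Char) : rN1 (repN2 ++ y) = repN2 ++ rN1 y := by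
  simp [rN1, repN2, repl1, List.isPrefixOf]
theorem pass_n1_repN2 (y : List Char) : rn1 (repN2 ++ y) = repN2 ++ rn1 y := by
  simp [rn1, repN2, repl1, List.isPrefixOf]
theorem pass_n0_repN2 (y : List Char) : rn0 (repN2 ++ y) = repN2 ++ rn0 y := by
  simp [rn0, repN2, repl1, List.isPrefixOf]

theorem pass_N3_tokN1 (y : List Char) : rN3 (tokN1 ++ y) = tokN1 ++ rN3 y := by
  simp [rN3, tokN1, repl1, List.isPrefixOf]
theorem pass_N2_tokN1 (y : List Char) : rN2 (tokN1 ++ y) = tokN1 ++ rN2 y := by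
  simp [rN2, tokN1, repl1, List.isPrefixOf]
theorem pass_n1_repN1 (y : List Char) : rn1 (repN1 ++ y) = repN1 ++ rn1 y := by
  simp [rn1, repN1, repl1, List.isPrefixOf]
theorem pass_n0_repN1 (y : List Char) : rn0 (repN1 ++ y) = repN1 ++ rn0 y := by
  simp [rn0, repN1, repl1, List.isPrefixOf]

theorem pass_N3_tokn1 (y : List Char) : rN3 (tokn1 ++ y) = tokn1 ++ rN3 y := by
  simp [rN3, tokn1, repl1, List.isPrefixOf]
theorem pass_N2_tokn1 (y : List Char) : rN2 (tokn1 ++ y) = tokn1 ++ rN2 y := by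
  simp [rN2, tokn1, repl1, List.isPrefixOf]
theorem pass_N1_tokn1 (y : List Char) : rN1 (tokn1 ++ y) = tokn1 ++ rN1 y := by
  simp [rN1, tokn1, repl1, List.isPrefixOf]
theorem pass_n0_repn1 (y : List Char) : rn0 (repn1 ++ y) = repn1 ++ rn0 y := by
  simp [rn0, repn1, repl1, List.isPrefixOf]

theorem pass_N3_tokn0 (y : List Char) : rN3 (tokn0 ++ y) = tokn0 ++ rN3 y := by
  simp [rN3, tokn0, repl1, List.isPrefixOf]
theorem pass_N2_tokn0 (y : List Char) : rN2 (tokn0 ++ y) = tokn0 ++ rN2 y := by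
  simp [rN2, tokn0, repl1, List.isPrefixOf]
theorem pass_N1_tokn0 (y : List Char) : rN1 (tokn0 ++ y) = tokn0 ++ rN1 y := by
  simp [rN1, tokn0, repl1, List.isPrefixOf]
theorem pass_n1_tokn0 (y : List Char) : rn1 (tokn0 ++ y) = tokn0 ++ rn1 y := by
  simp [rn1, tokn0, repl1, List.isPrefixOf]

-- the scanner's step on each token and on a non-token head
theorem scan_N3 (y : List Char) : scanB (tokN3 ++ y) = repN3 ++ scanB y := by
  rw [show tokN3 ++ y = '[' :: ('N' :: 'H' :: '3' :: '+' :: ']' :: y) from rfl, scanB]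
  simp [tokN3, List.isPrefixOf]
theorem scan_N2 (y : List Char) : scanB (tokN2 ++ y) = repN2 ++ scanB y := by
  rw [show tokN2 ++ y = '[' :: ('N' :: 'H' :: '2' :: '+' :: ']' :: y) from rfl, scanB]
  simp [tokN3, tokN2, List.isPrefixOf]
theorem scan_N1 (y : List Char) : scanB (tokN1 ++ y) = repN1 ++ scanB y := by
  rw [show tokN1 ++ y = '[' :: ('N' :: 'H' :: '+' :: ']' :: y) from rfl, scanB]
  simp [tokN3, tokN2, tokN1, List.isPrefixOf]
theorem scan_n1 (y : List Char) : scanB (tokn1 ++ y) = repn1 ++ scanB y := by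
  rw [show tokn1 ++ y = '[' :: ('n' :: 'H' :: '+' :: ']' :: y) from rfl, scanB]
  simp [tokN3, tokN2, tokN1, tokn1, List.isPrefixOf]
theorem scan_n0 (y : List Char) : scanB (tokn0 ++ y) = repn0 ++ scanB y := by
  rw [show tokn0 ++ y = '[' :: ('n' :: 'H' :: ']' :: y) from rfl, scanB]
  simp [tokN3, tokN2, tokN1, tokn1, tokn0, List.isPrefixOf]

theorem repl1_cons_not (o : Char) (old' new : List Char) (c : Char) (x : List Char)
    (h : (o :: old').isPrefixOf (c :: x) = false) :
    repl1 o old' new (c :: x) = c :: repl1 o old' new x := by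
  rw [repl1, if_neg (by simp [h])]

theorem scanB_cons_not (c : Char) (t : List Char)
    (h1 : tokN3.isPrefixOf (c :: t) = false) (h2 : tokN2.isPrefixOf (c :: t) = false)
    (h3 : tokN1.isPrefixOf (c :: t) = false) (h4 : tokn1.isPrefixOf (c :: t) = false)
    (h5 : tokn0.isPrefixOf (c :: t) = false) :
    scanB (c :: t) = c :: scanB t := by
  rw [scanB]
  simp [h1, h2, h3, h4, h5]

theorem seq_eq_scan_core : ∀ (n : Nat) (u : List Char), u.length ≤ n → seqA u = scanB u := by
  intro n
  induction n with
  | zero =>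
    intro u h
    have hu : u = [] := List.eq_nil_of_length_eq_zero (Nat.le_zero.mp h)
    subst hu
    simp [seqA, rN3, rN2, rN1, rn1, rn0, repl1, scanB]
  | succ n ih =>
    intro u h
    cases u with
    | nil => simp [seqA, rN3, rN2, rN1, rn1, rn0, repl1, scanB]
    | cons c t =>
      by_cases h1 : tokN3.isPrefixOf (c :: t) = true
      · obtain ⟨rest, hrest⟩ := List.isPrefixOf_iff_prefix.mp h1
        rw [← hrest]
        have hr : rest.length ≤ n := by
          have := congrArg List.length hrest
          simp [tokN3] at this h
          omega
        rw [show seqA (tokN3 ++ rest) = repN3 ++ seqA rest from by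
          simp [seqA, fire_N3, pass_N2_repN3, pass_N1_repN3, pass_n1_repN3, pass_n0_repN3]]
        rw [scan_N3, ih rest hr]
      · by_cases h2 : tokN2.isPrefixOf (c :: t) = true
        · obtain ⟨rest, hrest⟩ := List.isPrefixOf_iff_prefix.mp h2
          rw [← hrest]
          have hr : rest.length ≤ n := by
            have := congrArg List.length hrest
            simp [tokN2] at this h
            omega
          rw [show seqA (tokN2 ++ rest) = repN2 ++ seqA rest from by
            simp [seqA, pass_N3_tokN2, fire_N2, pass_N1_repN2, pass_n1_repN2, pass_n0_repN2]]
          rw [scan_N2, ih rest hr]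
        · by_cases h3 : tokN1.isPrefixOf (c :: t) = true
          · obtain ⟨rest, hrest⟩ := List.isPrefixOf_iff_prefix.mp h3
            rw [← hrest]
            have hr : rest.length ≤ n := by
              have := congrArg List.length hrest
              simp [tokN1] at this h
              omega
            rw [show seqA (tokN1 ++ rest) = repN1 ++ seqA rest from by
              simp [seqA, pass_N3_tokN1, pass_N2_tokN1, fire_N1, pass_n1_repN1, pass_n0_repN1]]
            rw [scan_N1, ih rest hr]
          · by_cases h4 : tokn1.isPrefixOf (c :: t) = true
            · obtain ⟨rest, hrest⟩ := List.isPrefixOf_iff_prefix.mp h4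
              rw [← hrest]
              have hr : rest.length ≤ n := by
                have := congrArg List.length hrest
                simp [tokn1] at this h
                omega
              rw [show seqA (tokn1 ++ rest) = repn1 ++ seqA rest from by
                simp [seqA, pass_N3_tokn1, pass_N2_tokn1, pass_N1_tokn1, fire_n1, pass_n0_repn1]]
              rw [scan_n1, ih rest hr]
            · by_cases h5 : tokn0.isPrefixOf (c :: t) = true
              · obtain ⟨rest, hrest⟩ := List.isPrefixOf_iff_prefix.mp h5
                rw [← hrest]
                have hr : rest.length ≤ n := by
                  have := congrArg List.length hrest
                  simp [tokn0] at this h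
                  omega
                rw [show seqA (tokn0 ++ rest) = repn0 ++ seqA rest from by
                  simp [seqA, pass_N3_tokn0, pass_N2_tokn0, pass_N1_tokn0, pass_n1_tokn0, fire_n0]]
                rw [scan_n0, ih rest hr]
              · -- no token matches at the head
                simp only [Bool.not_eq_true] at h1 h2 h3 h4 h5
                have ht : t.length ≤ n := by simp at h; omega
                by_cases hc : ('[' : Char) = c
                · subst hc
                  have t2 : (['N','H','2','+',']'] : List Char).isPrefixOf t = false := by
                    simpa [tokN2, List.isPrefixOf] using h2
                  have t3 : (['N','H','+',']'] : List Char).isPrefixOf t = false := by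
                    simpa [tokN1, List.isPrefixOf] using h3
                  have t4 : (['n','H','+',']'] : List Char).isPrefixOf t = false := by
                    simpa [tokn1, List.isPrefixOf] using h4
                  have t5 : (['n','H',']'] : List Char).isPrefixOf t = false := by
                    simpa [tokn0, List.isPrefixOf] using h5
                  -- each pass keeps the head '[' and the later tokens stay non-matching
                  have pp3 := fun w hw y => prefix_pass ['N','H','3','+',']'] (repN3.tail) y w hw
                  have pp2 := fun w hw y => prefix_pass ['N','H','2','+',']'] (repN2.tail) y w hw
                  have pp1 := fun w hw y => prefix_pass ['N','H','+',']'] (repN1.tail) y w hw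
                  have pp4 := fun w hw y => prefix_pass ['n','H','+',']'] (repn1.tail) y w hw
                  have e1 : rN3 ('[' :: t) = '[' :: rN3 t :=
                    repl1_cons_not _ _ _ _ _ (by simpa [tokN3] using h1)
                  have q2 : tokN2.isPrefixOf ('[' :: rN3 t) = false := by
                    have hpass : (['N','H','2','+',']'] : List Char).isPrefixOf (rN3 t) = (['N','H','2','+',']'] : List Char).isPrefixOf t := by
                      simpa [rN3, repN3] using pp3 ['N','H','2','+',']'] (by decide) t
                    simp [tokN2, List.isPrefixOf, hpass, t2]
                  have e2 : rN2 ('[' :: rN3 t) = '[' :: rN2 (rN3 t) :=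
                    repl1_cons_not _ _ _ _ _ (by simpa [tokN2] using q2)
                  have q3 : tokN1.isPrefixOf ('[' :: rN2 (rN3 t)) = false := by
                    have hp1 : (['N','H','+',']'] : List Char).isPrefixOf (rN3 t) = (['N','H','+',']'] : List Char).isPrefixOf t := by
                      simpa [rN3, repN3] using pp3 ['N','H','+',']'] (by decide) t
                    have hp2 : (['N','H','+',']'] : List Char).isPrefixOf (rN2 (rN3 t)) = (['N','H','+',']'] : List Char).isPrefixOf (rN3 t) := by
                      simpa [rN2, repN2] using pp2 ['N','H','+',']'] (by decide) (rN3 t)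
                    simp [tokN1, List.isPrefixOf, hp1, hp2, t3]
                  have e3 : rN1 ('[' :: rN2 (rN3 t)) = '[' :: rN1 (rN2 (rN3 t)) :=
                    repl1_cons_not _ _ _ _ _ (by simpa [tokN1] using q3)
                  have q4 : tokn1.isPrefixOf ('[' :: rN1 (rN2 (rN3 t))) = false := by
                    have hp1 : (['n','H','+',']'] : List Char).isPrefixOf (rN3 t) = (['n','H','+',']'] : List Char).isPrefixOf t := by
                      simpa [rN3, repN3] using pp3 ['n','H','+',']'] (by decide) t
                    have hp2 : (['n','H','+',']'] : List Char).isPrefixOf (rN2 (rN3 t)) = (['n','H','+',']'] : List Char).isPrefixOf (rN3 t) := by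
                      simpa [rN2, repN2] using pp2 ['n','H','+',']'] (by decide) (rN3 t)
                    have hp3 : (['n','H','+',']'] : List Char).isPrefixOf (rN1 (rN2 (rN3 t))) = (['n','H','+',']'] : List Char).isPrefixOf (rN2 (rN3 t)) := by
                      simpa [rN1, repN1] using pp1 ['n','H','+',']'] (by decide) (rN2 (rN3 t))
                    simp [tokn1, List.isPrefixOf, hp1, hp2, hp3, t4]
                  have e4 : rn1 ('[' :: rN1 (rN2 (rN3 t))) = '[' :: rn1 (rN1 (rN2 (rN3 t))) :=
                    repl1_cons_not _ _ _ _ _ (by simpa [tokn1] using q4)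
                  have q5 : tokn0.isPrefixOf ('[' :: rn1 (rN1 (rN2 (rN3 t)))) = false := by
                    have hp1 : (['n','H',']'] : List Char).isPrefixOf (rN3 t) = (['n','H',']'] : List Char).isPrefixOf t := by
                      simpa [rN3, repN3] using pp3 ['n','H',']'] (by decide) t
                    have hp2 : (['n','H',']'] : List Char).isPrefixOf (rN2 (rN3 t)) = (['n','H',']'] : List Char).isPrefixOf (rN3 t) := by
                      simpa [rN2, repN2] using pp2 ['n','H',']'] (by decide) (rN3 t)
                    have hp3 : (['n','H',']'] : List Char).isPrefixOf (rN1 (rN2 (rN3 t))) = (['n','H',']'] : List Char).isPrefixOf (rN2 (rN3 t)) := by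
                      simpa [rN1, repN1] using pp1 ['n','H',']'] (by decide) (rN2 (rN3 t))
                    have hp4 : (['n','H',']'] : List Char).isPrefixOf (rn1 (rN1 (rN2 (rN3 t)))) = (['n','H',']'] : List Char).isPrefixOf (rN1 (rN2 (rN3 t))) := by
                      simpa [rn1, repn1] using pp4 ['n','H',']'] (by decide) (rN1 (rN2 (rN3 t)))
                    simp [tokn0, List.isPrefixOf, hp1, hp2, hp3, hp4, t5]
                  have e5 : rn0 ('[' :: rn1 (rN1 (rN2 (rN3 t)))) = '[' :: rn0 (rn1 (rN1 (rN2 (rN3 t)))) :=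
                    repl1_cons_not _ _ _ _ _ (by simpa [tokn0] using q5)
                  rw [show seqA ('[' :: t) = '[' :: seqA t from by
                    simp [seqA, e1, e2, e3, e4, e5]]
                  rw [scanB_cons_not _ _ h1 h2 h3 h4 h5, ih t ht]
                · -- head is not '[': nothing can match at this position in any pass
                  have hb : (('[' : Char) == c) = false := beq_eq_false_iff_ne.mpr hc
                  have en : ∀ (old' new : List Char) (x : List Char),
                      repl1 '[' old' new (c :: x) = c :: repl1 '[' old' new x := by
                    intro old' new x
                    exact repl1_cons_not _ _ _ _ _ (by simp [List.isPrefixOf, hb])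
                  rw [show seqA (c :: t) = c :: seqA t from by
                    simp [seqA, rN3, rN2, rN1, rn1, rn0, en]]
                  rw [scanB_cons_not _ _ h1 h2 h3 h4 h5, ih t ht]

theorem seq_eq_scan (u : List Char) : seqA u = scanB u :=
  seq_eq_scan_core u.length u (le_refl _)

theorem chain_eq (p : String) :
    PySem.Str.replace (PySem.Str.replace (PySem.Str.replace (PySem.Str.replace (PySem.Str.replace p "[NH3+]" "[N+]([H])([H])[H]") "[NH2+]" "[N+]([H])([H])") "[NH+]" "[N+]([H])") "[nH+]" "[n+]([H])") "[nH]" "[n]([H])" = rewriteB p := by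
  apply String.toList_inj.mp
  simp only [PySem.Str.toList_replace, rewriteB, String.toList_ofList]
  rw [show ("[NH3+]" : String).toList = '[' :: ['N','H','3','+',']'] from rfl]
  rw [show ("[NH2+]" : String).toList = '[' :: ['N','H','2','+',']'] from rfl]
  rw [show ("[NH+]" : String).toList = '[' :: ['N','H','+',']'] from rfl]
  rw [show ("[nH+]" : String).toList = '[' :: ['n','H','+',']'] from rfl]
  rw [show ("[nH]" : String).toList = ('[' :: ['n','H',']'] : List Char) from rfl]
  rw [replace_eq, replace_eq, replace_eq, replace_eq, replace_eq]
  exact seq_eq_scan p.toList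

theorem apply_eq (t : String) : applyA t = applyB t := by
  unfold applyA applyB
  cases h : PySem.Str.split? t ">>" with
  | none => rfl
  | some l =>
    match l with
    | [] => rfl
    | [e] => rfl
    | [e, p] => simpa using congrArg (fun x => e ++ ">>" ++ x) (chain_eq p)
    | e :: p :: x :: xs => rfl

theorem getD_append_len {α : Type} (pre : List α) (a : α) (rest : List α) (d : α) :
    (pre ++ a :: rest).getD pre.length d = a := by
  induction pre with
  | nil => rfl
  | cons x xs ih => simpa using ih

theorem set_append_len {α : Type} (pre : List α) (a v : α) (rest : List α) :
    (pre ++ a :: rest).set pre.length v = pre ++ v :: rest := by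
  induction pre with
  | nil => rfl
  | cons x xs ih => simp [List.set, ih]

theorem inner_eq (f : String → String) (rest : List (List (List String))) (r' : List (List String)) :
    ∀ (ts : List String) (pre : List (List (List String))) (done : List String),
      (ts.foldl
        (fun (st2 : List (List (List String)) × Nat) transformation =>
          (st2.1.set pre.length ((st2.1.getD pre.length []).set 0
              (((st2.1.getD pre.length []).headD []).set st2.2 (f transformation))), st2.2 + 1))
        (pre ++ ((done ++ ts) :: r') :: rest, done.length))
      = (pre ++ ((done ++ ts.map f) :: r') :: rest, done.length + ts.length) := by
  intro ts
  induction ts with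
  | nil => intro pre done; simp
  | cons tr ts ih =>
    intro pre done
    rw [List.foldl_cons]
    have hg : (pre ++ ((done ++ tr :: ts) :: r') :: rest).getD pre.length [] = (done ++ tr :: ts) :: r' :=
      getD_append_len _ _ _ _
    rw [hg]
    have hset : (done ++ tr :: ts).set done.length (f tr) = (done ++ [f tr]) ++ ts := by
      rw [show done ++ tr :: ts = done ++ tr :: ts from rfl, set_append_len]
      simp
    simp only [List.headD_cons, List.set_cons_zero, hset]
    rw [set_append_len]
    have := ih pre (done ++ [f tr])
    simp only [List.append_assoc, List.singleton_append, List.length_append, List.length_cons,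
      List.length_nil] at this ⊢
    rw [this]
    simp [Nat.add_assoc, Nat.add_comm 1 ts.length]

theorem outer_eq :
    ∀ (rs pre : List (List (List String))),
      (rs.foldl
        (fun (st : List (List (List String)) × Nat) rule =>
          (((rule.headD []).foldl
            (fun (st2 : List (List (List String)) × Nat) transformation =>
              (st2.1.set st.2 ((st2.1.getD st.2 []).set 0
                  (((st2.1.getD st.2 []).headD []).set st2.2 (applyA transformation))), st2.2 + 1))
            (st.1, 0)).1, st.2 + 1))
        (pre ++ rs, pre.length)).1
      = pre ++ rs.map (fun rule => match rule with | [] => [] | ts :: r' => ts.map applyA :: r') := by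
  intro rs
  induction rs with
  | nil => intro pre; simp
  | cons rule rs ih =>
    intro pre
    rw [List.foldl_cons]
    cases rule with
    | nil =>
      simp only [List.headD_nil, List.foldl_nil]
      have := ih (pre ++ [[]])
      simp only [List.append_assoc, List.singleton_append, List.length_append, List.length_cons,
        List.length_nil, Nat.add_zero] at this ⊢
      rw [show pre.length + 1 = pre.length + (0 + 1) from by omega] at this
      simpa using this
    | cons ts r' =>
      have hinner := inner_eq applyA rs r' ts pre []
      simp only [List.nil_append, List.length_nil] at hinner
      rw [List.headD_cons, hinner]
      have := ih (pre ++ [ts.map applyA :: r'])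
      simp only [List.append_assoc, List.singleton_append, List.length_append, List.length_cons,
        List.length_nil, Nat.add_zero] at this ⊢
      rw [show pre.length + 1 = pre.length + (0 + 1) from by omega] at this
      simpa using this

theorem reformat_eq (rules : List (List (List String))) :
    reformat_rules rules = reformat_rules_alt rules := by
  show (rules.foldl
        (fun (st : List (List (List String)) × Nat) rule =>
          (((rule.headD []).foldl
            (fun (st2 : List (List (List String)) × Nat) transformation =>
              (st2.1.set st.2 ((st2.1.getD st.2 []).set 0
                  (((st2.1.getD st.2 []).headD []).set st2.2 (applyA transformation))), st2.2 + 1))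
            (st.1, 0)).1, st.2 + 1))
        (rules, 0)).1 = reformat_rules_alt rules
  have := outer_eq rules []
  simp only [List.nil_append, List.length_nil] at this
  rw [this, reformat_rules_alt]
  apply List.map_congr_left
  intro a _
  cases a with
  | nil => rfl
  | cons ts r' => exact congrArg (· :: r') (List.map_congr_left (fun x _ => apply_eq x))

-- ===== VERDICT (by name: the statement is the Claim_ definition above) =====
theorem reformat_rules_spec : Claim_equal_reformat_rules := by
  intro rules _ _
  exact reformat_eq rules
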